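-- pv_equiv track=rewrite | github.com/OlivierDehaene/GPA4.0 | word2phonetic/utils/decoding_utils.py | prepare_corpus
-- ===== SOURCE A (Python) =====
-- def prepare_corpus(wordList, phon):
--     corpus = {}
--     for w, p in zip(wordList, phon):
--         if w in corpus:
--             corpus[w].append(p.replace(" ", ""))
--         else:
--             corpus[w] = [p.replace(" ", "")]
--     return corpus
-- ===== SOURCE B (Python) =====
-- def prepare_corpus(wordList, phon):
--     pairs = [(w, p.replace(" ", "")) for w, p in zip(wordList, phon)]
--     return {w: [q for w2, q in pairs if w2 == w]
--             for w in dict.fromkeys(w for w, _ in pairs)}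
-- ===== Notes on version B (the rewrite author's own statement) =====
-- stated objective: alternative
-- what changed: Replaces A's one-pass dict build (membership test, append-or-create per item) with a two-phase gather: clean the zipped pairs once, deduplicate the words in first-occurrence order, then build each word's list by a comprehension over the pairs.
import Mathlib
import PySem

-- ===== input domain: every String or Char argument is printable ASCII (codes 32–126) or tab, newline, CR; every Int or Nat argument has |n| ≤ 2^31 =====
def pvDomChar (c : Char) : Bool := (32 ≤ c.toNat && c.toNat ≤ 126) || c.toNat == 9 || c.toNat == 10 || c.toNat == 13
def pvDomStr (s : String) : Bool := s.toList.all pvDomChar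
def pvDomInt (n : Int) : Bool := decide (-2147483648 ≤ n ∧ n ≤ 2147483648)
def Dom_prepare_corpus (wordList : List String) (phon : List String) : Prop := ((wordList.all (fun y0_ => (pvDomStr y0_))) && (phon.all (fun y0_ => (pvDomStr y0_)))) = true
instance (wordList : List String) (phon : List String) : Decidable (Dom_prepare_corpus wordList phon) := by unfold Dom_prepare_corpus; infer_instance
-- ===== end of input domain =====

-- B replaces A's one-pass dict build with clean pairs + ordered dedup of words + per-word gather
-- (alternative decomposition, same return value; no speed claim).

-- ===== PORT A =====
def prepare_corpus (wordList : List String) (phon : List String) : List (String × List String) :=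
  ((wordList.zip phon).foldl
    (fun corpus wp =>
      if corpus.contains wp.1 then
        corpus.modify wp.1 [] (fun l => l ++ [PySem.Str.replace wp.2 " " ""])
      else
        corpus.insert wp.1 [PySem.Str.replace wp.2 " " ""])
    PySem.Dict.empty).items

-- ===== PORT B =====
def prepare_corpus_alt (wordList : List String) (phon : List String) : List (String × List String) :=
  let pairs := (wordList.zip phon).map (fun wp => (wp.1, PySem.Str.replace wp.2 " " ""))
  (PySem.List.dedup (pairs.map (fun wp => wp.1))).map
    (fun w => (w, (pairs.filter (fun wp => wp.1 == w)).map (fun wp => wp.2)))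

-- ===== PRECONDITION & SPEC =====
def Spec_prepare_corpus (wordList : List String) (phon : List String) (out : List (String × List String)) : Prop := out = prepare_corpus_alt wordList phon
instance (wordList : List String) (phon : List String) (out : List (String × List String)) : Decidable (Spec_prepare_corpus wordList phon out) := by unfold Spec_prepare_corpus; infer_instance

-- ===== CLAIM (what is proved, stated in full; the proofs are below) =====
def Claim_equal_prepare_corpus : Prop := ∀ (wordList : List String) (phon : List String), Dom_prepare_corpus wordList phon → Spec_prepare_corpus wordList phon (prepare_corpus wordList phon)

-- ===== LEMMAS AND PROOFS =====

-- A's if/else (append when present, create when absent) is exactly Python's d.modify k [] (· ++ [q]).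
theorem branch_eq_modify (d : PySem.Dict String (List String)) (w : String) (q : String) :
    (if d.contains w then d.modify w [] (fun l => l ++ [q]) else d.insert w [q])
      = d.modify w [] (fun l => l ++ [q]) := by
  by_cases h : d.contains w
  · simp [h]
  · have h' : d.contains w = false := by simpa using h
    simp [h', PySem.Dict.modify, PySem.Dict.insert, PySem.Dict.getD_of_not_contains]

theorem prepare_corpus_eq_modify_fold (wordList phon : List String) :
    prepare_corpus wordList phon
      = (((wordList.zip phon).map (fun wp => (wp.1, PySem.Str.replace wp.2 " " ""))).foldl
          (fun d p => d.modify p.1 [] (fun l => l ++ [p.2])) PySem.Dict.empty).items := by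
  unfold prepare_corpus
  rw [List.foldl_map]
  congr 1
  apply PySem.List.foldl_congr_mem
  intro d wp _
  exact branch_eq_modify d wp.1 (PySem.Str.replace wp.2 " " "")

-- ===== VERDICT (by name: the statement is the Claim_ definition above) =====
theorem prepare_corpus_spec : Claim_equal_prepare_corpus := by
  intro wordList phon _
  show prepare_corpus wordList phon = prepare_corpus_alt wordList phon
  rw [prepare_corpus_eq_modify_fold]
  unfold prepare_corpus_alt
  set pairs := (wordList.zip phon).map (fun wp => (wp.1, PySem.Str.replace wp.2 " " "")) with hp
  have hnd : ((pairs.foldl (fun d p => d.modify p.1 [] (fun l => l ++ [p.2]))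
      PySem.Dict.empty).keys).Nodup := by
    exact PySem.Dict.nodup_keys_foldl_modify_key pairs (fun p => p.1) []
      (fun d p => fun l => l ++ [p.2]) PySem.Dict.empty (by simp)
  rw [PySem.Dict.items_eq_map_keys _ hnd []]
  rw [PySem.Dict.keys_foldl_modify_key]
  simp only [PySem.Dict.keys_empty, PySem.Set.update_nil_left, PySem.List.dedup_eq_ofList]
  apply List.map_congr_left
  intro w _
  rw [PySem.Dict.getD_foldl_modify_append]
  simp
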